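-- pv_equiv track=rewrite | github.com/thejasvibhat/smashed | Barreviews/address.py | tokenize_autocomplete
-- ===== SOURCE A (Python) =====
-- def tokenize_autocomplete(phrase):
--     a = []
--     for word in phrase.split():
--         j = 1
--         while True:
--             a.append(word[0:0 + j])
--             if j == len(word):
--                 break
--             j += 1
--     return a
-- ===== SOURCE B (Python) =====
-- def tokenize_autocomplete(phrase):
--     out = []
--     for word in phrase.split():
--         prefix = ""
--         for ch in word:
--             prefix += ch
--             out.append(prefix)
--     return out
-- ===== Notes on version B (the rewrite author's own statement) =====
-- stated objective: alternative
-- what changed: B builds each word's prefixes by a running accumulator string grown one character at a time, instead of A's unbounded while-loop that re-slices word[0:j] from scratch for each j.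
import Mathlib
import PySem

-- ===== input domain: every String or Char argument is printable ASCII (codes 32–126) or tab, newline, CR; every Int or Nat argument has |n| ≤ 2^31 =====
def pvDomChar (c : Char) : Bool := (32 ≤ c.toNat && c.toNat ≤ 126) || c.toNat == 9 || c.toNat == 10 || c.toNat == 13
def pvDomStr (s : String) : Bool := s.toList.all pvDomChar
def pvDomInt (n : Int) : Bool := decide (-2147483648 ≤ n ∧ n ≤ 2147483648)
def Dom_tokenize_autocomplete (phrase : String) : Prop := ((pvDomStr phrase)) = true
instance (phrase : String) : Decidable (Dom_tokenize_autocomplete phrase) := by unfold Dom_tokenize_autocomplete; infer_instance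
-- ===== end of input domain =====

-- B replaces A's while-loop of fresh slices word[0:j] by a running prefix accumulator; same output (alternative decomposition, no speed claim).

-- ===== PORT A =====
-- inner 'while True' loop of A: appends word[0:0+j], stops when j == len(word), else j += 1.
-- fuel only guards totality: called with fuel = len(word), exactly the iterations the Python loop
-- performs on the (always nonempty) words produced by phrase.split().
def pvLoopA (word : String) : Nat → Nat → List String
  | _, 0 => []
  | j, fuel+1 =>
    PySem.Str.slice word (some 0) (some ((0 : Int) + (j : Int))) ::
      (if (j : Int) = PySem.Str.len word then [] else pvLoopA word (j+1) fuel)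

def tokenize_autocomplete (phrase : String) : List String :=
  (PySem.Str.split₀ phrase).foldl
    (fun a word => a ++ pvLoopA word 1 (PySem.Str.len word).toNat) []

-- ===== PORT B =====
-- inner 'for ch in word' loop of B: grows the running prefix and appends it each step.
def pvPrefB : List Char → List Char → List String
  | [], _ => []
  | c :: rest, p =>
    let p' := p ++ [c]
    String.ofList p' :: pvPrefB rest p'

def tokenize_autocomplete_alt (phrase : String) : List String :=
  (PySem.Str.split₀ phrase).foldl
    (fun out word => out ++ pvPrefB word.toList []) []

-- ===== PRECONDITION & SPEC =====
def Spec_tokenize_autocomplete (phrase : String) (out : List String) : Prop := out = tokenize_autocomplete_alt phrase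
instance (phrase : String) (out : List String) : Decidable (Spec_tokenize_autocomplete phrase out) := by unfold Spec_tokenize_autocomplete; infer_instance

-- ===== CLAIM (what is proved, stated in full; the proofs are below) =====
def Claim_equal_tokenize_autocomplete : Prop := ∀ (phrase : String), Dom_tokenize_autocomplete phrase → Spec_tokenize_autocomplete phrase (tokenize_autocomplete phrase)

-- ===== LEMMAS AND PROOFS =====

theorem pvLoopA_succ (word : String) (j fuel : Nat) :
    pvLoopA word j (fuel+1) =
      PySem.Str.slice word (some 0) (some ((0 : Int) + (j : Int))) ::
        (if (j : Int) = PySem.Str.len word then [] else pvLoopA word (j+1) fuel) := rfl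

-- every piece produced by split₀.go is nonempty (given the pieces already accumulated are)
theorem pv_split₀_go_ne_nil :
    ∀ (s cur : List Char) (acc : List (List Char)),
      (∀ w ∈ acc, w ≠ []) →
      ∀ w ∈ PySem.Chars.split₀.go s cur acc, w ≠ [] := by
  intro s
  induction s with
  | nil =>
    intro cur acc hacc w hw
    simp only [PySem.Chars.split₀.go] at hw
    split at hw
    · exact hacc w (List.mem_reverse.mp hw)
    · rename_i hne
      rcases List.mem_cons.mp (List.mem_reverse.mp hw) with h | h
      · subst h
        have hcur : cur ≠ [] := by simpa [List.isEmpty_iff] using hne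
        simpa using hcur
      · exact hacc w h
  | cons c rest ih =>
    intro cur acc hacc w hw
    simp only [PySem.Chars.split₀.go] at hw
    split at hw
    · split at hw
      · exact ih [] acc hacc w hw
      · rename_i hne
        refine ih [] (cur.reverse :: acc) ?_ w hw
        intro v hv
        rcases List.mem_cons.mp hv with h | h
        · subst h
          have hcur : cur ≠ [] := by simpa [List.isEmpty_iff] using hne
          simpa using hcur
        · exact hacc v h
    · exact ih (c :: cur) acc hacc w hw

theorem pv_split₀_toList_ne_nil (s : String) (w : String)
    (hw : w ∈ PySem.Str.split₀ s) : w.toList ≠ [] := by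
  have hmem : w.toList ∈ PySem.Chars.split₀ s.toList := by
    rw [← PySem.Str.split₀_map_toList]
    exact List.mem_map_of_mem hw
  exact pv_split₀_go_ne_nil s.toList [] [] (by simp) w.toList hmem

theorem pv_loop_eq (word : String) :
    ∀ (rest p : List Char), word.toList = p ++ rest → rest ≠ [] →
      pvLoopA word (p.length + 1) rest.length = pvPrefB rest p := by
  intro rest
  induction rest with
  | nil => intro p _ h; exact absurd rfl h
  | cons c rest' ih =>
    intro p hsplit _
    have htake : word.toList.take (p.length + 1) = p ++ [c] := by
      rw [hsplit, List.take_append]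
      simp
    have hslice : PySem.Str.slice word (some 0) (some ((0 : Int) + ((p.length + 1 : Nat) : Int)))
        = String.ofList (p ++ [c]) := by
      have hb : ((0 : Int) + ((p.length + 1 : Nat) : Int)) = ((p.length + 1 : Nat) : Int) := by ring
      rw [PySem.Str.slice, PySem.Chars.slice, hb, PySem.List.slice_zero_start,
        PySem.List.slice_to_natCast, htake]
    have hlen : PySem.Str.len word = ((p.length : Int) + (rest'.length : Int) + 1) := by
      rw [PySem.Str.len_eq, hsplit]
      push_cast [List.length_append, List.length_cons]
      ring
    rw [List.length_cons, pvLoopA_succ, hslice]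
    cases rest' with
    | nil =>
      have hpos : (((p.length + 1 : Nat) : Int) = PySem.Str.len word) := by
        rw [hlen]; push_cast [List.length_nil]; ring
      rw [if_pos hpos]
      simp [pvPrefB]
    | cons d t =>
      have hne : ¬ (((p.length + 1 : Nat) : Int) = PySem.Str.len word) := by
        rw [hlen]; push_cast [List.length_cons]; omega
      rw [if_neg hne]
      have hrec : pvLoopA word (p.length + 1 + 1) (d :: t).length = pvPrefB (d :: t) (p ++ [c]) := by
        have := ih (p ++ [c]) (by simpa using hsplit) (by simp)
        simpa using this
      rw [hrec]
      simp [pvPrefB]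

theorem pv_word_eq (word : String) (h : word.toList ≠ []) :
    pvLoopA word 1 (PySem.Str.len word).toNat = pvPrefB word.toList [] := by
  have hlen : (PySem.Str.len word).toNat = word.toList.length := by
    rw [PySem.Str.len_eq]; exact Int.toNat_natCast _
  have := pv_loop_eq word word.toList [] (by simp) h
  simpa [hlen] using this

-- ===== VERDICT (by name: the statement is the Claim_ definition above) =====
theorem tokenize_autocomplete_spec : Claim_equal_tokenize_autocomplete := by
  intro phrase _
  unfold Spec_tokenize_autocomplete tokenize_autocomplete tokenize_autocomplete_alt
  refine PySem.List.foldl_congr_mem _ _ _ _ (fun a word hw => ?_)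
  rw [pv_word_eq word (pv_split₀_toList_ne_nil phrase word hw)]
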